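-- pv_equiv track=rewrite | github.com/C-B-U/algorithm_challenge | 시즌 17/중/rivermoon-03/0409_10_rivermoon-03.py | solve
-- ===== SOURCE A (Python) =====
-- def solve(s):
--     # 3의 배수인지
--     if len(s) % 3 != 0:
--         return "mix"
--
--     k = len(s) // 3 # 만들어야 HOH의 개수
--
--     h_pos = []
--     o_pos = []
--
--     # H와 O의 위치 저장
--     for i in range(len(s)):
--         if s[i] == 'H':
--             h_pos.append(i)
--         elif s[i] == 'O':
--             o_pos.append(i)
--
--     # O가 k개면 H는 2k개 있어야
--     if len(h_pos) != 2 * k or len(o_pos) != k: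
--         return "mix"
--
--     # 1~k개까지 위치 확인
--     for i in range(k):
--         # 왼쪽 H
--         left_h = h_pos[i]
--
--         # O
--         o = o_pos[i]
--
--         # 뒤의 H
--         right_h = h_pos[i + k]
--
--         # 하나라도 어긋나면 틀림
--         if left_h < o and o < right_h:
--             pass
--         else:
--             return "mix"
--
--     # 한 번도 안 걸렸으면
--     return "pure"
-- ===== SOURCE B (Python) =====
-- def solve(s):
--     # Balance-counter scan: no position lists; one pass with running H/O counts.
--     if len(s) % 3 != 0:
--         return "mix"
--     k = len(s) // 3
--     if s.count('H') != 2 * k or s.count('O') != k: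
--         return "mix"
--     h = o = 0
--     for c in s:
--         if c == 'H':
--             h += 1
--         else:
--             if not (o < h <= k + o):
--                 return "mix"
--             o += 1
--     return "pure"
-- ===== Notes on version B (the rewrite author's own statement) =====
-- stated objective: simpler
-- what changed: Replaces A's position-list construction and index comparisons h_pos[i] < o_pos[i] < h_pos[i+k] by a single balance-counter scan that, after the length and count gates, requires o < h <= k + o at every oxygen character.
import Mathlib
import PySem

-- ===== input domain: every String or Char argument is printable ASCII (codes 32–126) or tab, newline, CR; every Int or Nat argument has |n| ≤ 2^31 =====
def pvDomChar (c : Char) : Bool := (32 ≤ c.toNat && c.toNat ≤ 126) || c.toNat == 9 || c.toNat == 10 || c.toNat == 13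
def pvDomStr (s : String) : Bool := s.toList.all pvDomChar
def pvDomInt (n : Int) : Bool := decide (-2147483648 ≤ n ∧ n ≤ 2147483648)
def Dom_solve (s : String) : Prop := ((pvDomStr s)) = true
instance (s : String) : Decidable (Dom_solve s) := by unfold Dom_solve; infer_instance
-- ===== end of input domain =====

-- B replaces A's position lists and index comparisons by a single balance-counter scan (simpler, same O(n) cost).

-- ===== PORT A =====
-- A: collect H/O positions, check counts, then compare h_pos[i] < o_pos[i] < h_pos[i+k].
-- (i ranges over valid indices throughout, so `getD` is exact for Python's s[i] / list[i].)
def solve (s : String) : String :=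
  let l := s.toList
  let n := l.length
  if n % 3 ≠ 0 then "mix"
  else
    let k := n / 3
    let st := (List.range n).foldl (fun (st : List Nat × List Nat) i =>
        if l.getD i ' ' = 'H' then (st.1 ++ [i], st.2)
        else if l.getD i ' ' = 'O' then (st.1, st.2 ++ [i])
        else st) ([], [])
    let h_pos := st.1
    let o_pos := st.2
    if h_pos.length ≠ 2 * k ∨ o_pos.length ≠ k then "mix"
    else if (List.range k).all (fun i =>
        decide (h_pos.getD i 0 < o_pos.getD i 0 ∧ o_pos.getD i 0 < h_pos.getD (i + k) 0))
    then "pure" else "mix"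

-- ===== PORT B =====
-- the loop of Source B: running counts h of 'H' and o of 'O'; at every non-'H' char require o < h ≤ k + o
def scanB (k : Nat) : List Char → Nat → Nat → Bool
  | [], _, _ => true
  | c :: t, h, o =>
    if c = 'H' then scanB k t (h + 1) o
    else if o < h ∧ h ≤ k + o then scanB k t h (o + 1)
    else false

-- `s.count('H')` on a single-character needle is exactly the character count of the char list.
def solve_alt (s : String) : String :=
  let l := s.toList
  let n := l.length
  if n % 3 ≠ 0 then "mix"
  else
    let k := n / 3
    if l.count 'H' ≠ 2 * k ∨ l.count 'O' ≠ k then "mix"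
    else if scanB k l 0 0 then "pure" else "mix"

-- ===== PRECONDITION & SPEC =====
def Spec_solve (s : String) (out : String) : Prop := out = solve_alt s
instance (s : String) (out : String) : Decidable (Spec_solve s out) := by unfold Spec_solve; infer_instance

-- ===== CLAIM (what is proved, stated in full; the proofs are below) =====
def Claim_equal_solve : Prop := ∀ (s : String), Dom_solve s → Spec_solve s (solve s)

-- ===== LEMMAS AND PROOFS =====

-- positions (ascending) of character c in a list
def pos (c : Char) : List Char → List Nat
  | [] => []
  | d :: t => if d = c then 0 :: (pos c t).map (· + 1) else (pos c t).map (· + 1)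

lemma pos_length (c : Char) (l : List Char) : (pos c l).length = l.count c := by
  induction l with
  | nil => simp [pos]
  | cons d t ih =>
    by_cases h : d = c <;> simp [pos, h, ih]

lemma pos_mem {c : Char} {l : List Char} {q : Nat} (hq : q ∈ pos c l) :
    q < l.length ∧ l.getD q ' ' = c := by
  induction l generalizing q with
  | nil => simp [pos] at hq
  | cons d t ih =>
    by_cases h : d = c
    · rw [pos, if_pos h] at hq
      rcases List.mem_cons.mp hq with rfl | hq'
      · subst h; simp
      · simp only [List.mem_map] at hq'
        obtain ⟨q', hmem, rfl⟩ := hq'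
        obtain ⟨h1, h2⟩ := ih hmem
        refine ⟨by simp; omega, by simpa using h2⟩
    · rw [pos, if_neg h] at hq
      simp only [List.mem_map] at hq
      obtain ⟨q', hmem, rfl⟩ := hq
      obtain ⟨h1, h2⟩ := ih hmem
      refine ⟨by simp; omega, by simpa using h2⟩

lemma pos_append (c : Char) (a b : List Char) :
    pos c (a ++ b) = pos c a ++ (pos c b).map (· + a.length) := by
  induction a with
  | nil => simp [pos]
  | cons d t ih =>
    by_cases h : d = c <;>
      simp [pos, h, ih, List.map_map, Function.comp_def, Nat.add_assoc]

-- count-vs-index: the j-th c-position is < p  iff  fewer than j+1 c's occur before p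
lemma pos_getD_lt {c : Char} (l : List Char) {p j : Nat} (hp : p ≤ l.length)
    (hj : j < (pos c l).length) :
    ((pos c l).getD j 0 < p ↔ j < (l.take p).count c) := by
  have hsplit : pos c l = pos c (l.take p) ++ (pos c (l.drop p)).map (· + (l.take p).length) := by
    conv_lhs => rw [← List.take_append_drop p l, pos_append]
  have htl : (l.take p).length = p := by simp [hp]
  have ht : (pos c (l.take p)).length = (l.take p).count c := pos_length c _
  by_cases hcase : j < (pos c (l.take p)).length
  · rw [hsplit, List.getD_append _ _ _ _ hcase]
    have hmem : (pos c (l.take p)).getD j 0 ∈ pos c (l.take p) := by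
      rw [List.getD_eq_getElem _ _ hcase]; exact List.getElem_mem _
    have := (pos_mem hmem).1
    rw [htl] at this
    constructor
    · intro _; omega
    · intro _; omega
  · have hj' : (pos c (l.take p)).length ≤ j := by omega
    rw [hsplit, List.getD_append_right _ _ _ _ hj']
    have hlen : j - (pos c (l.take p)).length < ((pos c (l.drop p)).map (· + (l.take p).length)).length := by
      rw [hsplit] at hj; simp at hj ⊢; omega
    rw [List.getD_eq_getElem _ _ hlen]
    have hmem : ((pos c (l.drop p)).map (· + (l.take p).length))[j - (pos c (l.take p)).length] ∈
        (pos c (l.drop p)).map (· + (l.take p).length) := List.getElem_mem _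
    simp only [List.mem_map] at hmem
    obtain ⟨x, _, hx⟩ := hmem
    rw [← hx, htl]
    constructor
    · intro h; omega
    · intro h; omega

-- the (count of c before p)-th c-position is p itself, when l[p] = c
lemma pos_getD_self {c : Char} (l : List Char) {p : Nat} (hp : p < l.length)
    (hc : l.getD p ' ' = c) :
    (pos c l).getD ((l.take p).count c) 0 = p := by
  have hsplit : pos c l = pos c (l.take p) ++ (pos c (l.drop p)).map (· + (l.take p).length) := by
    conv_lhs => rw [← List.take_append_drop p l, pos_append]
  have htl : (l.take p).length = p := by simp [Nat.le_of_lt hp]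
  have ht : (pos c (l.take p)).length = (l.take p).count c := pos_length c _
  have hdrop : l.drop p = l[p] :: l.drop (p + 1) := List.drop_eq_getElem_cons hp
  have hgp : l[p] = c := by rwa [List.getD_eq_getElem _ _ hp] at hc
  rw [hsplit, List.getD_append_right _ _ _ _ (by omega)]
  rw [hdrop, hgp]
  simp [pos, htl, ht]

-- two distinct characters cannot jointly account for more than the length
lemma count_HO_le (l : List Char) : l.count 'H' + l.count 'O' ≤ l.length := by
  induction l with
  | nil => simp
  | cons d t ih =>
    simp only [List.count_cons, List.length_cons]
    by_cases h1 : d = 'H' <;> by_cases h2 : d = 'O' <;> simp_all <;> omega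

-- if every character is counted by 'H' or 'O', there is no third kind
lemma all_HO {l : List Char} (h : l.count 'H' + l.count 'O' = l.length) :
    ∀ c ∈ l, c = 'H' ∨ c = 'O' := by
  induction l with
  | nil => simp
  | cons d t ih =>
    have hle := count_HO_le t
    simp only [List.count_cons, List.length_cons] at h
    by_cases h1 : d = 'H'
    · intro c hc
      rcases List.mem_cons.mp hc with rfl | hc'
      · exact Or.inl h1
      · exact ih (by simp [h1] at h; omega) c hc'
    · by_cases h2 : d = 'O'
      · intro c hc
        rcases List.mem_cons.mp hc with rfl | hc'
        · exact Or.inr h2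
        · exact ih (by simp [h2] at h; omega) c hc'
      · exfalso; simp [h1, h2] at h; omega

-- the balance scan is exactly the prefix-count condition at every 'O'
lemma scan_iff (l : List Char) (k : Nat) (HO : ∀ c ∈ l, c = 'H' ∨ c = 'O') :
    ∀ h o : Nat, (scanB k l h o = true ↔
      ∀ p, p < l.length → l.getD p ' ' = 'O' →
        (o + (l.take p).count 'O' < h + (l.take p).count 'H' ∧
         h + (l.take p).count 'H' ≤ k + (o + (l.take p).count 'O'))) := by
  induction l with
  | nil => intro h o; simp [scanB]
  | cons d t ih =>
    intro h o
    have HOt : ∀ c ∈ t, c = 'H' ∨ c = 'O' := fun c hc => HO c (List.mem_cons_of_mem d hc)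
    by_cases hd : d = 'H'
    · rw [scanB, if_pos hd, ih HOt (h + 1) o]
      constructor
      · intro P p hp hO
        match p with
        | 0 => rw [List.getD_cons_zero, hd] at hO; exact absurd hO (by decide)
        | q + 1 =>
          have := P q (by simpa using hp) (by simpa using hO)
          simp only [List.take_succ_cons, List.count_cons, hd]
          simp at this ⊢
          omega
      · intro P q hq hO
        have := P (q + 1) (by simpa using hq) (by simpa using hO)
        simp only [List.take_succ_cons, List.count_cons, hd] at this
        simp at this ⊢
        omega
    · have hdO : d = 'O' := (HO d (List.mem_cons_self)).resolve_left hd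
      rw [scanB, if_neg hd]
      by_cases hcond : o < h ∧ h ≤ k + o
      · rw [if_pos hcond, ih HOt h (o + 1)]
        constructor
        · intro P p hp hO
          match p with
          | 0 => simpa using hcond
          | q + 1 =>
            have := P q (by simpa using hp) (by simpa using hO)
            simp only [List.take_succ_cons, List.count_cons, hdO]
            simp [hd] at this ⊢
            omega
        · intro P q hq hO
          have := P (q + 1) (by simpa using hq) (by simpa using hO)
          simp only [List.take_succ_cons, List.count_cons, hdO] at this
          simp at this
          omega
      · rw [if_neg hcond]
        simp only [Bool.false_eq_true, false_iff]
        intro P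
        have := P 0 (by simp) (by simp [hdO])
        simp at this
        exact hcond (by omega)

-- A's index check is the same prefix-count condition
lemma A_iff (l : List Char) (k : Nat) (hH : (pos 'H' l).length = 2 * k)
    (hO : (pos 'O' l).length = k) :
    (((List.range k).all (fun j =>
        decide ((pos 'H' l).getD j 0 < (pos 'O' l).getD j 0 ∧
                (pos 'O' l).getD j 0 < (pos 'H' l).getD (j + k) 0))) = true ↔
      ∀ p, p < l.length → l.getD p ' ' = 'O' →
        (0 + (l.take p).count 'O' < 0 + (l.take p).count 'H' ∧
         0 + (l.take p).count 'H' ≤ k + (0 + (l.take p).count 'O'))) := by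
  simp only [List.all_eq_true, List.mem_range, decide_eq_true_eq, Nat.zero_add]
  constructor
  · intro P p hp hOc
    set j := (l.take p).count 'O' with hj
    have hjk : j < k := by
      have hsum : l.count 'O' = (l.take p).count 'O' + (l.drop p).count 'O' := by
        conv_lhs => rw [← List.take_append_drop p l]
        rw [List.count_append]
      have hdrop : l.drop p = l[p] :: l.drop (p + 1) := List.drop_eq_getElem_cons hp
      have hgp : l[p] = 'O' := by rwa [List.getD_eq_getElem _ _ hp] at hOc
      rw [hdrop, hgp] at hsum
      have : l.count 'O' = (pos 'O' l).length := (pos_length 'O' l).symm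
      simp [List.count_cons] at hsum
      omega
    obtain ⟨P1, P2⟩ := P j hjk
    have hop : (pos 'O' l).getD j 0 = p := pos_getD_self l hp hOc
    rw [hop] at P1 P2
    have h1 := (pos_getD_lt (c := 'H') l (Nat.le_of_lt hp) (by omega)).mp P1
    have h2 : ¬ ((pos 'H' l).getD (j + k) 0 < p) := by omega
    rw [pos_getD_lt (c := 'H') l (Nat.le_of_lt hp) (by omega)] at h2
    exact ⟨by omega, by omega⟩
  · intro P j hjk
    have hjO : j < (pos 'O' l).length := by omega
    set p := (pos 'O' l).getD j 0 with hp
    have hmem : p ∈ pos 'O' l := by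
      rw [hp, List.getD_eq_getElem _ _ hjO]; exact List.getElem_mem _
    obtain ⟨hplen, hpO⟩ := pos_mem hmem
    obtain ⟨P1, P2⟩ := P p hplen hpO
    -- j equals the number of 'O' before p
    have hle : (l.take p).count 'O' ≤ j := by
      have := (pos_getD_lt (c := 'O') l (Nat.le_of_lt hplen) hjO)
      rw [← hp] at this
      have hnot : ¬ (p < p) := by omega
      omega
    have hcnt1 : (l.take (p + 1)).count 'O' = (l.take p).count 'O' + 1 := by
      have hgp : l[p] = 'O' := by rwa [List.getD_eq_getElem _ _ hplen] at hpO
      rw [List.take_succ, List.getElem?_eq_getElem hplen]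
      rw [List.count_append, hgp]
      simp
    have hge : j ≤ (l.take p).count 'O' := by
      have := (pos_getD_lt (c := 'O') (l := l) (p := p + 1) (by omega) hjO)
      rw [← hp, hcnt1] at this
      have : j < (l.take p).count 'O' + 1 := this.mp (by omega)
      omega
    have hjeq : (l.take p).count 'O' = j := by omega
    constructor
    · rw [pos_getD_lt (c := 'H') l (Nat.le_of_lt hplen) (by omega)]
      omega
    · have hjkH : j + k < (pos 'H' l).length := by omega
      have hnotlt : ¬ ((pos 'H' l).getD (j + k) 0 < p) := by
        rw [pos_getD_lt (c := 'H') l (Nat.le_of_lt hplen) hjkH]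
        omega
      have hne : (pos 'H' l).getD (j + k) 0 ≠ p := by
        intro he
        have hmemH : (pos 'H' l).getD (j + k) 0 ∈ pos 'H' l := by
          rw [List.getD_eq_getElem _ _ hjkH]; exact List.getElem_mem _
        have := (pos_mem hmemH).2
        rw [he, hpO] at this
        exact absurd this (by decide)
      omega

-- A's position-building fold computes exactly pos 'H' / pos 'O'
lemma fold_pos (l : List Char) :
    ∀ m, m ≤ l.length →
      ((List.range m).foldl (fun (st : List Nat × List Nat) i =>
          if l.getD i ' ' = 'H' then (st.1 ++ [i], st.2)
          else if l.getD i ' ' = 'O' then (st.1, st.2 ++ [i])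
          else st) ([], [])) = (pos 'H' (l.take m), pos 'O' (l.take m)) := by
  intro m
  induction m with
  | zero => intro _; simp [pos]
  | succ m ih =>
    intro hm
    have hm' : m < l.length := by omega
    rw [List.range_succ, List.foldl_append, ih (by omega)]
    have htake : l.take (m + 1) = l.take m ++ [l[m]] := by
      rw [List.take_succ, List.getElem?_eq_getElem hm']
      rfl
    have hlen : (l.take m).length = m := by simp [Nat.le_of_lt hm']
    have hget : l.getD m ' ' = l[m] := List.getD_eq_getElem _ _ hm'
    rw [htake, pos_append 'H', pos_append 'O', hlen]
    simp only [List.foldl_cons, List.foldl_nil, hget]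
    by_cases h1 : l[m] = 'H'
    · simp [pos, h1]
    · by_cases h2 : l[m] = 'O'
      · simp [pos, h2]
      · simp [pos, h1, h2]

-- ===== VERDICT =====
theorem solve_spec : Claim_equal_solve := by
  intro s _
  unfold Spec_solve
  simp only [solve, solve_alt]
  by_cases h3 : s.toList.length % 3 ≠ 0
  · rw [if_pos h3, if_pos h3]
  · rw [if_neg h3, if_neg h3]
    push Not at h3
    have hfold : ((List.range s.toList.length).foldl (fun (st : List Nat × List Nat) i =>
        if s.toList.getD i ' ' = 'H' then (st.1 ++ [i], st.2)
        else if s.toList.getD i ' ' = 'O' then (st.1, st.2 ++ [i])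
        else st) ([], [])) = (pos 'H' s.toList, pos 'O' s.toList) := by
      have h := fold_pos s.toList s.toList.length le_rfl
      rwa [List.take_length] at h
    rw [hfold]
    simp only
    rw [pos_length, pos_length]
    by_cases hc : (s.toList.count 'H' ≠ 2 * (s.toList.length / 3) ∨
        s.toList.count 'O' ≠ s.toList.length / 3)
    · rw [if_pos hc, if_pos hc]
    · rw [if_neg hc, if_neg hc]
      push Not at hc
      obtain ⟨hH, hO⟩ := hc
      have hn : s.toList.length = 3 * (s.toList.length / 3) := by omega
      have HO : ∀ c ∈ s.toList, c = 'H' ∨ c = 'O' := all_HO (by omega)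
      congr 1
      exact propext ((A_iff s.toList (s.toList.length / 3)
          (by rw [pos_length]; exact hH) (by rw [pos_length]; exact hO)).trans
        (scan_iff s.toList (s.toList.length / 3) HO 0 0).symm)
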